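-- pv_equiv track=rewrite | github.com/NVIDIA/GenerativeAIExamples | industries/energy/simulation-workflow-agent/sim_agent/src/simulator_agent/skills/input_file_skill/utils.py | parse_data_sections
-- ===== SOURCE A (Python) =====
-- from typing import Dict, List, Optional, Tuple
--
-- def parse_data_sections(content: str) -> Dict[str, str]:
--     """
--     Parse DATA file into sections.
--
--     Returns dict with section names as keys and content as values.
--     """
--     sections = {}
--     current_section = "HEADER"
--     current_content = []
--
--     for line in content.split('\n'):
--         # Check if line starts a new section
--         stripped = line.strip()
--         if stripped and not stripped.startswith('--'):
--             # Common OPM sections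
--             section_keywords = [
--                 'RUNSPEC', 'GRID', 'EDIT', 'PROPS', 'REGIONS',
--                 'SOLUTION', 'SUMMARY', 'SCHEDULE'
--             ]
--             for keyword in section_keywords:
--                 if stripped.startswith(keyword):
--                     # Save previous section
--                     if current_content:
--                         sections[current_section] = '\n'.join(current_content)
--                     current_section = keyword
--                     current_content = [line]
--                     break
--             else:
--                 current_content.append(line)
--         else:
--             current_content.append(line)
--
--     # Save last section
--     if current_content:
--         sections[current_section] = '\n'.join(current_content)
--
--     return sections
-- ===== SOURCE B (Python) =====
-- SECTION_KEYWORDS = ['RUNSPEC', 'GRID', 'EDIT', 'PROPS', 'REGIONS',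
--                     'SOLUTION', 'SUMMARY', 'SCHEDULE']
--
--
-- def _header_of(line):
--     """Return the section keyword that this line opens, or None."""
--     stripped = line.strip()
--     if stripped and not stripped.startswith('--'):
--         for keyword in SECTION_KEYWORDS:
--             if stripped.startswith(keyword):
--                 return keyword
--     return None
--
--
-- def parse_data_sections(content: str):
--     """
--     Parse DATA file into sections.
--
--     Two passes: first collect the line indices where a section keyword
--     starts, then slice the line list between consecutive boundaries.
--     """
--     lines = content.split('\n')
--     bounds = []
--     for i, line in enumerate(lines):
--         kw = _header_of(line)
--         if kw is not None:
--             bounds.append((i, kw))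
--     starts = [(0, 'HEADER')] + bounds
--     ends = [i for i, _ in bounds] + [len(lines)]
--     sections = {}
--     for (start, name), end in zip(starts, ends):
--         if start < end:
--             sections[name] = '\n'.join(lines[start:end])
--     return sections
-- ===== Notes on version B (the rewrite author's own statement) =====
-- stated objective: alternative
-- what changed: Replaces A's single pass with a mutable (dict, current_section, accumulator) state by a two-pass decomposition: first collect the indices of section-header lines, then slice the line list between consecutive boundaries and join each slice.
import Mathlib
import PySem

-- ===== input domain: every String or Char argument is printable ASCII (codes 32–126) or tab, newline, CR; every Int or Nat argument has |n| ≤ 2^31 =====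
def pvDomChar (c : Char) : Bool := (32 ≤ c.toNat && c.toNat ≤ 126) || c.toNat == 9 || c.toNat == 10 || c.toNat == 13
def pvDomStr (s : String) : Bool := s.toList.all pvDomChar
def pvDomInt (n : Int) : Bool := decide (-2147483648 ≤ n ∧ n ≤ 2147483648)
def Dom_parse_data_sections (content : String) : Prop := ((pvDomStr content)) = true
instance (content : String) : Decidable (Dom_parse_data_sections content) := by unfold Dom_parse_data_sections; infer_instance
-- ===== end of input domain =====

-- B replaces A's single pass with mutable (dict, current_section, accumulator) state by a
-- two-pass decomposition: collect header-line indices, then slice between consecutive boundaries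
-- (objective: alternative decomposition, same asymptotic cost).

-- ===== PORT A =====
def pvKeywordsA : List String :=
  ["RUNSPEC", "GRID", "EDIT", "PROPS", "REGIONS", "SOLUTION", "SUMMARY", "SCHEDULE"]

def pvStepA (st : PySem.Dict String String × String × List String) (line : String) :
    PySem.Dict String String × String × List String :=
  let stripped := PySem.Str.strip line
  if stripped != "" && !(PySem.Str.startswith stripped "--") then
    match pvKeywordsA.find? (fun kw => PySem.Str.startswith stripped kw) with
    | some kw =>
        ((if st.2.2 ≠ [] then st.1.insert st.2.1 (PySem.Str.join "\n" st.2.2) else st.1), kw, [line])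
    | none => (st.1, st.2.1, st.2.2 ++ [line])
  else (st.1, st.2.1, st.2.2 ++ [line])

def parse_data_sections (content : String) : List (String × String) :=
  -- content.split('\n'): the separator "\n" is non-empty, so split? is always `some`; getD only unwraps
  let lines := (PySem.Str.split? content "\n").getD []
  let fin := lines.foldl pvStepA (PySem.Dict.empty, "HEADER", ([] : List String))
  (if fin.2.2 ≠ [] then fin.1.insert fin.2.1 (PySem.Str.join "\n" fin.2.2) else fin.1).items

-- ===== PORT B =====
def pvKeywordsB : List String :=
  ["RUNSPEC", "GRID", "EDIT", "PROPS", "REGIONS", "SOLUTION", "SUMMARY", "SCHEDULE"]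

def pvHeaderOf (line : String) : Option String :=
  let stripped := PySem.Str.strip line
  if stripped != "" && !(PySem.Str.startswith stripped "--") then
    pvKeywordsB.find? (fun kw => PySem.Str.startswith stripped kw)
  else none

def parse_data_sections_alt (content : String) : List (String × String) :=
  let lines := (PySem.Str.split? content "\n").getD []
  let bounds := (PySem.List.enumerate lines).foldl
    (fun b p => match pvHeaderOf p.2 with | some kw => b ++ [(p.1, kw)] | none => b)
    ([] : List (Int × String))
  -- starts = [(0,'HEADER')] + bounds, ends = [i for i,_ in bounds] + [len(lines)], zipped
  let pairs := (((0 : Int), "HEADER") :: bounds).zip (bounds.map (·.1) ++ [(lines.length : Int)])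
  (pairs.foldl
    (fun d q => if q.1.1 < q.2 then
        d.insert q.1.2 (PySem.Str.join "\n" (PySem.List.slice lines (some q.1.1) (some q.2)))
      else d)
    PySem.Dict.empty).items

-- ===== PRECONDITION & SPEC =====
def Spec_parse_data_sections (content : String) (out : List (String × String)) : Prop := out = parse_data_sections_alt content
instance (content : String) (out : List (String × String)) : Decidable (Spec_parse_data_sections content out) := by unfold Spec_parse_data_sections; infer_instance

-- ===== CLAIM (what is proved, stated in full; the proofs are below) =====
def Claim_equal_parse_data_sections : Prop := ∀ (content : String), Dom_parse_data_sections content → Spec_parse_data_sections content (parse_data_sections content)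

-- ===== LEMMAS AND PROOFS =====

def pvJoin (xs : List String) : String := PySem.Str.join "\n" xs

/-- The common section decomposition: (prefix before the first header line, header groups). -/
def pvSplit1 : List String → List String × List (String × List String)
  | [] => ([], [])
  | l :: ls =>
    let p := pvSplit1 ls
    match pvHeaderOf l with
    | some kw => ([], (kw, l :: p.1) :: p.2)
    | none => (l :: p.1, p.2)

def pvDictBuild (d : PySem.Dict String String) (gs : List (String × List String)) :
    PySem.Dict String String :=
  gs.foldl (fun d g => d.insert g.1 (pvJoin g.2)) d

def pvF (p : Int × String) : Option (Int × String) := (pvHeaderOf p.2).map (fun kw => (p.1, kw))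

def pvBnds (L : List String) : List (Int × String) := (PySem.List.enumerate L).filterMap pvF

def pvShiftB (bs : List (Int × String)) : List (Int × String) := bs.map (fun q => (q.1 + 1, q.2))

def pvFb (L : List String) : Int := match pvBnds L with | [] => (L.length : Int) | q :: _ => q.1

/-- Recursive form of `zip bounds (tail-of-their-firsts ++ [n])`. -/
def pvPairsRec (bs : List (Int × String)) (n : Int) : List ((Int × String) × Int) :=
  match bs with
  | [] => []
  | q :: rest => (q, match rest with | [] => n | r :: _ => r.1) :: pvPairsRec rest n

def pvTailPairs (L : List String) : List ((Int × String) × Int) :=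
  pvPairsRec (pvBnds L) (L.length : Int)

def pvShift (ps : List ((Int × String) × Int)) : List ((Int × String) × Int) :=
  ps.map (fun q => ((q.1.1 + 1, q.1.2), q.2 + 1))

def pvEnt (L : List String) (ps : List ((Int × String) × Int)) : List (String × List String) :=
  ps.filterMap (fun q =>
    if q.1.1 < q.2 then some (q.1.2, PySem.List.slice L (some q.1.1) (some q.2)) else none)

lemma pvStepA_eq (d : PySem.Dict String String) (cur : String) (acc : List String) (l : String) :
    pvStepA (d, cur, acc) l = match pvHeaderOf l with
      | some kw => ((if acc ≠ [] then d.insert cur (pvJoin acc) else d), kw, [l])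
      | none => (d, cur, acc ++ [l]) := by
  have hk : pvKeywordsA = pvKeywordsB := rfl
  unfold pvStepA pvHeaderOf pvJoin
  rw [hk]
  by_cases hc :
      (PySem.Str.strip l != "" && !(PySem.Str.startswith (PySem.Str.strip l) "--")) = true
  · rw [if_pos hc, if_pos hc]
  · rw [if_neg hc, if_neg hc]

lemma pvLoopA : ∀ (lines : List String) (d : PySem.Dict String String) (cur : String)
    (acc : List String),
    (if (lines.foldl pvStepA (d, cur, acc)).2.2 ≠ [] then
        (lines.foldl pvStepA (d, cur, acc)).1.insert (lines.foldl pvStepA (d, cur, acc)).2.1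
          (pvJoin (lines.foldl pvStepA (d, cur, acc)).2.2)
      else (lines.foldl pvStepA (d, cur, acc)).1)
    = pvDictBuild
        (if acc ++ (pvSplit1 lines).1 ≠ [] then
          d.insert cur (pvJoin (acc ++ (pvSplit1 lines).1)) else d)
        (pvSplit1 lines).2 := by
  intro lines
  induction lines with
  | nil => intro d cur acc; simp [pvSplit1, pvDictBuild]
  | cons l ls ih =>
    intro d cur acc
    simp only [List.foldl_cons, pvStepA_eq]
    cases h : pvHeaderOf l with
    | none =>
      simp only [h]
      rw [ih]
      have hap : (acc ++ [l]) ++ (pvSplit1 ls).1 = acc ++ (l :: (pvSplit1 ls).1) := by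
        rw [List.append_assoc]; rfl
      simp only [pvSplit1, h, hap]
    | some kw =>
      simp only [h]
      rw [ih]
      simp only [pvSplit1, h]
      have h1 : ([l] ++ (pvSplit1 ls).1) ≠ [] := by simp
      rw [if_pos h1]
      have h2 : pvDictBuild
          (if acc ++ [] ≠ [] then d.insert cur (pvJoin (acc ++ [])) else d)
          ((kw, l :: (pvSplit1 ls).1) :: (pvSplit1 ls).2)
          = pvDictBuild
            ((if acc ++ [] ≠ [] then d.insert cur (pvJoin (acc ++ [])) else d).insert kw
              (pvJoin (l :: (pvSplit1 ls).1)))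
            (pvSplit1 ls).2 := by
        simp [pvDictBuild]
      rw [h2, List.append_nil]
      rfl

lemma pvBoundsFold : ∀ (xs : List (Int × String)) (b : List (Int × String)),
    xs.foldl (fun b p => match pvHeaderOf p.2 with | some kw => b ++ [(p.1, kw)] | none => b) b
    = b ++ xs.filterMap pvF := by
  intro xs
  induction xs with
  | nil => intro b; simp
  | cons x xs ih =>
    intro b
    rw [List.foldl_cons, List.filterMap_cons]
    cases h : pvHeaderOf x.2 with
    | none => simp only [h, pvF, Option.map_none]; exact ih b
    | some kw =>
      simp only [h, pvF, Option.map_some]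
      rw [ih (b ++ [(x.1, kw)]), List.append_assoc]
      rfl

lemma pvBnds_shift : ∀ (xs : List String) (s : Int),
    (PySem.List.enumerate xs (s + 1)).filterMap pvF
    = pvShiftB ((PySem.List.enumerate xs s).filterMap pvF) := by
  intro xs
  induction xs with
  | nil => intro s; simp [PySem.List.enumerate_nil, pvShiftB]
  | cons x xs ih =>
    intro s
    rw [PySem.List.enumerate_cons, PySem.List.enumerate_cons, List.filterMap_cons,
      List.filterMap_cons]
    have hF1 : pvF (s + 1, x) = (pvHeaderOf x).map (fun kw => (s + 1, kw)) := rfl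
    have hF2 : pvF (s, x) = (pvHeaderOf x).map (fun kw => (s, kw)) := rfl
    rw [hF1, hF2]
    cases h : pvHeaderOf x with
    | none => simp only [h, Option.map_none]; exact ih (s + 1)
    | some kw =>
      simp only [h, Option.map_some, pvShiftB, List.map_cons]
      rw [ih (s + 1)]
      rfl

lemma pvBnds_cons (l : String) (L : List String) :
    pvBnds (l :: L) = match pvHeaderOf l with
      | some kw => ((0 : Int), kw) :: pvShiftB (pvBnds L)
      | none => pvShiftB (pvBnds L) := by
  unfold pvBnds
  rw [PySem.List.enumerate_cons, List.filterMap_cons]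
  have hF : pvF ((0 : Int), l) = (pvHeaderOf l).map (fun kw => ((0 : Int), kw)) := rfl
  rw [hF]
  have hsh : (PySem.List.enumerate L ((0 : Int) + 1)).filterMap pvF
      = pvShiftB ((PySem.List.enumerate L 0).filterMap pvF) := pvBnds_shift L 0
  cases h : pvHeaderOf l with
  | none => simp only [h, Option.map_none]; exact hsh
  | some kw => simp only [h, Option.map_some]; rw [hsh]

lemma pvSlice_zero_cons (l : String) (L : List String) (j : Int) (hj : 0 ≤ j) :
    PySem.List.slice (l :: L) (some 0) (some (j + 1)) = l :: PySem.List.slice L (some 0) (some j) := by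
  rw [PySem.List.slice_toNat _ le_rfl (by omega : (0:Int) ≤ j + 1),
    PySem.List.slice_toNat _ le_rfl hj]
  have h1 : (j + 1).toNat = j.toNat + 1 := by omega
  simp [h1]

lemma pvSlice_shift (l : String) (L : List String) (i j : Int) (hi : 0 ≤ i) (hj : 0 ≤ j) :
    PySem.List.slice (l :: L) (some (i + 1)) (some (j + 1)) = PySem.List.slice L (some i) (some j) := by
  rw [PySem.List.slice_toNat _ (by omega : (0:Int) ≤ i + 1) (by omega : (0:Int) ≤ j + 1),
    PySem.List.slice_toNat _ hi hj]
  have h1 : (j + 1).toNat = j.toNat + 1 := by omega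
  have h2 : (i + 1).toNat = i.toNat + 1 := by omega
  simp [h1, h2]

lemma pvEnt_shift : ∀ (ps : List ((Int × String) × Int)) (l : String) (L : List String),
    (∀ q ∈ ps, 0 ≤ q.1.1 ∧ 0 ≤ q.2) → pvEnt (l :: L) (pvShift ps) = pvEnt L ps := by
  intro ps l L
  induction ps with
  | nil => intro _; rfl
  | cons q ps ih =>
    intro h
    obtain ⟨h1, h2⟩ := h q List.mem_cons_self
    have ih' := ih (fun q hq => h q (List.mem_cons_of_mem _ hq))
    unfold pvEnt pvShift at *
    simp only [List.map_cons, List.filterMap_cons]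
    by_cases hlt : q.1.1 < q.2
    · rw [if_pos (by omega : q.1.1 + 1 < q.2 + 1), if_pos hlt,
        pvSlice_shift l L q.1.1 q.2 h1 h2, ih']
    · rw [if_neg (by omega : ¬ q.1.1 + 1 < q.2 + 1), if_neg hlt, ih']

lemma pvPairsRec_shift : ∀ (bs : List (Int × String)) (n : Int),
    pvPairsRec (pvShiftB bs) (n + 1) = pvShift (pvPairsRec bs n) := by
  intro bs
  induction bs with
  | nil => intro n; rfl
  | cons q rest ih =>
    intro n
    cases rest with
    | nil => rfl
    | cons r rr =>
      show ((q.1 + 1, q.2), r.1 + 1) :: pvPairsRec (pvShiftB (r :: rr)) (n + 1)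
          = ((q.1 + 1, q.2), r.1 + 1) :: pvShift (pvPairsRec (r :: rr) n)
      exact congrArg _ (ih n)

lemma pvZipRec : ∀ (bs : List (Int × String)) (n : Int),
    bs.zip ((bs.map (·.1)).tail ++ [n]) = pvPairsRec bs n := by
  intro bs
  induction bs with
  | nil => intro n; rfl
  | cons q rest ih =>
    intro n
    cases rest with
    | nil => rfl
    | cons r rr =>
      show (q, r.1) :: (r :: rr).zip (List.map (·.1) rr ++ [n]) = (q, r.1) :: pvPairsRec (r :: rr) n
      have hih := ih n
      simp only [List.map_cons, List.tail_cons] at hih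
      exact congrArg _ hih

lemma pvFb_cons (l : String) (L : List String) :
    pvFb (l :: L) = match pvHeaderOf l with
      | some _ => 0
      | none => pvFb L + 1 := by
  unfold pvFb
  rw [pvBnds_cons]
  cases h : pvHeaderOf l with
  | some kw => simp
  | none =>
    cases hB : pvBnds L with
    | nil => simp [pvShiftB, hB]
    | cons q rest => simp [pvShiftB, hB]

lemma pvTailPairs_cons (l : String) (L : List String) :
    pvTailPairs (l :: L) = match pvHeaderOf l with
      | some kw => ((((0 : Int), kw), pvFb L + 1)) :: pvShift (pvTailPairs L)
      | none => pvShift (pvTailPairs L) := by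
  unfold pvTailPairs
  rw [pvBnds_cons]
  have hlen : ((l :: L).length : Int) = (L.length : Int) + 1 := by
    simp [List.length_cons]
  cases h : pvHeaderOf l with
  | none =>
    simp only [hlen]
    exact pvPairsRec_shift (pvBnds L) (L.length : Int)
  | some kw =>
    simp only [hlen]
    have hrec : pvPairsRec (((0 : Int), kw) :: pvShiftB (pvBnds L)) ((L.length : Int) + 1)
        = (((0 : Int), kw),
            match pvShiftB (pvBnds L) with | [] => (L.length : Int) + 1 | r :: _ => r.1)
          :: pvPairsRec (pvShiftB (pvBnds L)) ((L.length : Int) + 1) := rfl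
    rw [hrec, pvPairsRec_shift (pvBnds L) (L.length : Int)]
    unfold pvFb
    cases hB : pvBnds L with
    | nil => rfl
    | cons q rest => rfl

lemma pvMain : ∀ L : List String,
    PySem.List.slice L (some 0) (some (pvFb L)) = (pvSplit1 L).1
    ∧ ((pvSplit1 L).1 = [] ↔ pvFb L = 0)
    ∧ pvEnt L (pvTailPairs L) = (pvSplit1 L).2
    ∧ 0 ≤ pvFb L
    ∧ (∀ q ∈ pvTailPairs L, 0 ≤ q.1.1 ∧ 0 ≤ q.2) := by
  intro L
  induction L with
  | nil =>
    have hB : pvBnds [] = [] := by simp [pvBnds, PySem.List.enumerate_nil]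
    have hfb : pvFb ([] : List String) = 0 := by simp [pvFb, hB]
    have htp : pvTailPairs ([] : List String) = [] := by simp [pvTailPairs, pvPairsRec, hB]
    refine ⟨?_, ?_, ?_, ?_, ?_⟩
    · rw [hfb, PySem.List.slice_toNat _ le_rfl le_rfl]; simp [pvSplit1]
    · simp [pvSplit1, hfb]
    · simp [pvEnt, pvSplit1, htp]
    · omega
    · simp [htp]
  | cons l L ih =>
    obtain ⟨hslice, hiff, hent, hfb, hinv⟩ := ih
    cases h : pvHeaderOf l with
    | some kw =>
      refine ⟨?_, ?_, ?_, ?_, ?_⟩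
      · rw [pvFb_cons]; simp only [h]
        rw [PySem.List.slice_toNat _ le_rfl le_rfl]; simp [pvSplit1, h]
      · rw [pvFb_cons]; simp [pvSplit1, h]
      · rw [pvTailPairs_cons]; simp only [h]
        unfold pvEnt
        rw [List.filterMap_cons]
        rw [if_pos (show ((((0:Int), kw), pvFb L + 1)).1.1 < (((0:Int), kw), pvFb L + 1).2 from
          Int.lt_add_one_iff.mpr hfb)]
        have hsl : PySem.List.slice (l :: L) (some 0) (some (pvFb L + 1))
            = l :: (pvSplit1 L).1 := by rw [pvSlice_zero_cons l L _ hfb, hslice]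
        have hrest : pvEnt (l :: L) (pvShift (pvTailPairs L)) = (pvSplit1 L).2 := by
          rw [pvEnt_shift _ _ _ hinv, hent]
        unfold pvEnt at hrest
        rw [hrest]
        simp only [pvSplit1, h]
        rw [hsl]
      · rw [pvFb_cons]; simp only [h]; omega
      · rw [pvTailPairs_cons]; simp only [h]
        intro q hq
        rcases List.mem_cons.mp hq with hq | hq
        · subst hq
          refine ⟨le_refl 0, ?_⟩
          dsimp only
          linarith
        · simp only [pvShift, List.mem_map] at hq
          obtain ⟨q', hq', rfl⟩ := hq
          obtain ⟨a, b⟩ := hinv q' hq'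
          refine ⟨?_, ?_⟩ <;> dsimp only <;> omega
    | none =>
      refine ⟨?_, ?_, ?_, ?_, ?_⟩
      · rw [pvFb_cons]; simp only [h]
        rw [pvSlice_zero_cons l L _ hfb, hslice]; simp [pvSplit1, h]
      · rw [pvFb_cons]; simp only [h]
        simp only [pvSplit1, h]
        constructor
        · intro hc; exact absurd hc (by simp)
        · intro hc; exfalso; linarith
      · rw [pvTailPairs_cons]; simp only [h]
        rw [pvEnt_shift _ _ _ hinv, hent]; simp [pvSplit1, h]
      · rw [pvFb_cons]; simp only [h]; linarith
      · rw [pvTailPairs_cons]; simp only [h]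
        intro q hq
        simp only [pvShift, List.mem_map] at hq
        obtain ⟨q', hq', rfl⟩ := hq
        obtain ⟨a, b⟩ := hinv q' hq'
        refine ⟨?_, ?_⟩ <;> dsimp only <;> omega

lemma pvPairs_eq (L : List String) :
    ((((0 : Int), "HEADER") :: pvBnds L).zip ((pvBnds L).map (·.1) ++ [(L.length : Int)]))
    = ((((0 : Int), "HEADER"), pvFb L)) :: pvTailPairs L := by
  have h := pvZipRec (((0 : Int), "HEADER") :: pvBnds L) (L.length : Int)
  simp only [List.map_cons, List.tail_cons] at h
  rw [h]
  unfold pvFb pvTailPairs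
  cases hB : pvBnds L with
  | nil => rfl
  | cons q rest => rfl

lemma pvFoldB (L : List String) : ∀ (ps : List ((Int × String) × Int)) (d : PySem.Dict String String),
    ps.foldl (fun d q => if q.1.1 < q.2 then
        d.insert q.1.2 (PySem.Str.join "\n" (PySem.List.slice L (some q.1.1) (some q.2)))
      else d) d
    = pvDictBuild d (pvEnt L ps) := by
  intro ps
  induction ps with
  | nil => intro d; simp [pvEnt, pvDictBuild]
  | cons q ps ih =>
    intro d
    rw [List.foldl_cons]
    by_cases hq : q.1.1 < q.2
    · rw [if_pos hq, ih]
      unfold pvEnt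
      rw [List.filterMap_cons, if_pos hq]
      simp [pvDictBuild, pvJoin]
    · rw [if_neg hq, ih]
      unfold pvEnt
      rw [List.filterMap_cons, if_neg hq]

-- ===== VERDICT (by name: the statement is the Claim_ definition above) =====
theorem parse_data_sections_spec : Claim_equal_parse_data_sections := by
  unfold Claim_equal_parse_data_sections
  intro content _
  unfold Spec_parse_data_sections
  obtain ⟨hslice, hiff, hent, hfb, hinv⟩ := pvMain ((PySem.Str.split? content "\n").getD [])
  set L := (PySem.Str.split? content "\n").getD [] with hL
  have hA := pvLoopA L PySem.Dict.empty "HEADER" []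
  simp only [List.nil_append, pvJoin] at hA
  have hAside : parse_data_sections content
      = (pvDictBuild
          (if (pvSplit1 L).1 ≠ [] then
            PySem.Dict.empty.insert "HEADER" (PySem.Str.join "\n" (pvSplit1 L).1)
          else PySem.Dict.empty)
          (pvSplit1 L).2).items := by
    simp only [parse_data_sections, ← hL]
    rw [hA]
  have hBside : parse_data_sections_alt content
      = (pvDictBuild PySem.Dict.empty
          (pvEnt L (((((0 : Int), "HEADER"), pvFb L)) :: pvTailPairs L))).items := by
    simp only [parse_data_sections_alt, ← hL]
    rw [pvBoundsFold, List.nil_append]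
    rw [show (PySem.List.enumerate L).filterMap pvF = pvBnds L from rfl]
    rw [pvPairs_eq, pvFoldB]
  rw [hAside, hBside]
  congr 1
  have hcons : pvEnt L (((((0 : Int), "HEADER"), pvFb L)) :: pvTailPairs L)
      = (if (0 : Int) < pvFb L then
          [("HEADER", PySem.List.slice L (some 0) (some (pvFb L)))] else [])
        ++ pvEnt L (pvTailPairs L) := by
    unfold pvEnt
    rw [List.filterMap_cons]
    by_cases h0 : (0 : Int) < pvFb L
    · rw [if_pos h0, if_pos h0]; rfl
    · rw [if_neg h0, if_neg h0]; rfl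
  rw [hcons, hent, hslice]
  by_cases hpre : (pvSplit1 L).1 = []
  · have h0 : pvFb L = 0 := hiff.mp hpre
    rw [if_neg (show ¬ (0 : Int) < pvFb L by rw [h0]; exact lt_irrefl 0),
      if_neg (by simpa using hpre)]
    rfl
  · have h0 : pvFb L ≠ 0 := fun hh => hpre (hiff.mpr hh)
    rw [if_pos (lt_of_le_of_ne hfb (Ne.symm h0)), if_pos hpre]
    simp [pvDictBuild, pvJoin]
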